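-- pv_equiv track=rewrite | github.com/pypi-data/pypi-mirror-46 | packages/tokenizer-cstm/tokenizer_cstm-0.7-py3-none-any.whl/tokenizer/tokenizer.py | get_sentance_raw_txt
-- ===== SOURCE A (Python) =====
-- def get_sentance_raw_txt(raw_string):
--     is_sentance = False
--     i=0
--     for i, c in enumerate(raw_string):
--         if c in set(['.','?','!']):
--             is_sentance = True
--             return is_sentance, raw_string[:i+1], raw_string[i+1:]
--     return False, '', raw_string
-- ===== SOURCE B (Python) =====
-- def get_sentance_raw_txt(raw_string):
--     hits = [j for j in (raw_string.find(c) for c in '.?!') if j != -1]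
--     if not hits:
--         return False, '', raw_string
--     i = min(hits)
--     return True, raw_string[:i + 1], raw_string[i + 1:]
-- ===== Notes on version B (the rewrite author's own statement) =====
-- stated objective: faster
-- what changed: Replaces the single Python-level enumerate loop with early return by three C-level str.find searches (one per terminator) combined by min of the non-negative hits.
import Mathlib
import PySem

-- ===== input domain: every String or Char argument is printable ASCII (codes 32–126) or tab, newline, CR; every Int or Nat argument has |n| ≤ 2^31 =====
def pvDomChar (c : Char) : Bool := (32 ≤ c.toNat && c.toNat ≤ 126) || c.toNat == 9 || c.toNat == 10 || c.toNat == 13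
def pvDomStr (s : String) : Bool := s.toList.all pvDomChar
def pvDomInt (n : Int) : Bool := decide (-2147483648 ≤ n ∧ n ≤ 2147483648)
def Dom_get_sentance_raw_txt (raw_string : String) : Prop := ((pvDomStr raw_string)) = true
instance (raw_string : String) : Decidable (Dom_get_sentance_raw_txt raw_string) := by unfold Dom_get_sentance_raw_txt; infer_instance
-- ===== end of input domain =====

-- B replaces A's single enumerate loop (early return) by three str.find searches combined by min; objective: idiomatic.


-- ===== PORT A =====
-- the 'for i, c in enumerate(raw_string)' loop with its early return
def pvAgo (s : String) (l : List (Int × Char)) : Bool × String × String :=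
  match l with
  | [] => (false, "", s)
  | (i, c) :: rest =>
    if PySem.Set.contains (PySem.Set.ofList ['.', '?', '!']) c then
      (true, PySem.Str.slice s none (some (i + 1)), PySem.Str.slice s (some (i + 1)) none)
    else pvAgo s rest

def get_sentance_raw_txt (raw_string : String) : Bool × String × String :=
  pvAgo raw_string (PySem.List.enumerate raw_string.toList)

-- ===== PORT B =====
def get_sentance_raw_txt_alt (raw_string : String) : Bool × String × String :=
  let hits := (['.', '?', '!'].map (fun c => PySem.Str.find raw_string (String.ofList [c]))).filter
      (fun j => j ≠ -1)
  match PySem.List.min? hits (fun x => x) with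
  | none => (false, "", raw_string)
  | some i => (true, PySem.Str.slice raw_string none (some (i + 1)),
               PySem.Str.slice raw_string (some (i + 1)) none)

-- ===== PRECONDITION & SPEC =====
def Spec_get_sentance_raw_txt (raw_string : String) (out : Bool × String × String) : Prop := out = get_sentance_raw_txt_alt raw_string
instance (raw_string : String) (out : Bool × String × String) : Decidable (Spec_get_sentance_raw_txt raw_string out) := by unfold Spec_get_sentance_raw_txt; infer_instance

-- ===== CLAIM (what is proved, stated in full; the proofs are below) =====
def Claim_equal_get_sentance_raw_txt : Prop := ∀ (raw_string : String), Dom_get_sentance_raw_txt raw_string → Spec_get_sentance_raw_txt raw_string (get_sentance_raw_txt raw_string)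

-- ===== LEMMAS AND PROOFS =====

-- predicate: "c is a sentence terminator"
def pvTerm (c : Char) : Bool := decide (c = '.') || (decide (c = '?') || decide (c = '!'))

theorem pvContains_eq (c : Char) :
    PySem.Set.contains (PySem.Set.ofList ['.', '?', '!']) c = pvTerm c := by
  have h : PySem.Set.ofList ['.', '?', '!'] = ['.', '?', '!'] := by decide
  rw [h]; simp [PySem.Set.contains, pvTerm]

-- A's loop, characterised by findIdx?
theorem pvAgo_spec (s : String) (l : List Char) (k : Nat) :
    pvAgo s (PySem.List.enumerate l (k : Int)) =
      match l.findIdx? pvTerm with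
      | none => (false, "", s)
      | some j => (true, PySem.Str.slice s none (some ((k + j : Nat) + 1)),
                   PySem.Str.slice s (some ((k + j : Nat) + 1)) none) := by
  induction l generalizing k with
  | nil => simp [PySem.List.enumerate_nil, pvAgo]
  | cons x xs ih =>
    rw [PySem.List.enumerate_cons, List.findIdx?_cons]
    by_cases hx : pvTerm x = true
    · simp [pvAgo, hx]
      intro h1 h2 h3
      exfalso
      simp [pvTerm, h1, h2, h3] at hx
    · have h1 : ((k : Int) + 1) = ((k + 1 : Nat) : Int) := by push_cast; ring
      simp only [pvAgo, pvContains_eq, hx, if_neg, Bool.false_eq_true, not_false_iff, h1, ih (k + 1)]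
      cases hfi : xs.findIdx? pvTerm with
      | none => simp
      | some j =>
        have h2 : (k + 1 + j : Nat) = (k + (j + 1) : Nat) := by omega
        simp [h2]

-- singleton infix ↔ membership
theorem pvSingleton_infix (c : Char) (l : List Char) : [c] <:+: l ↔ c ∈ l := by
  constructor
  · intro h; exact List.singleton_sublist.mp h.sublist
  · intro h
    obtain ⟨u, v, rfl⟩ := List.append_of_mem h
    exact ⟨u, v, by simp⟩

-- singleton prefix of a drop = the character there
theorem pvPrefix_drop (c : Char) (l : List Char) (m : Nat) :
    [c] <+: l.drop m ↔ l[m]? = some c := by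
  constructor
  · intro h
    obtain ⟨t, ht⟩ := h
    have : (l.drop m).head? = some c := by rw [← ht]; simp
    rwa [List.head?_drop] at this
  · intro h
    have hm : m < l.length := by
      by_contra hh
      simp [List.getElem?_eq_none (by omega : l.length ≤ m)] at h
    rw [List.drop_eq_getElem_cons hm]
    have : l[m] = c := by simpa [List.getElem?_eq_getElem hm] using h
    exact ⟨l.drop (m + 1), by simp [this]⟩

-- any hit of a terminator char is at index ≥ j (the first terminator position)
theorem pvFind_ge (l : List Char) (c : Char) (j : Nat)
    (hc : pvTerm c = true)
    (hbef : ∀ i (h : i < l.length), i < j → pvTerm l[i] = false) :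
    PySem.Chars.find l [c] = -1 ∨ ((j : Int) ≤ PySem.Chars.find l [c]) := by
  by_cases h : PySem.Chars.find l [c] = -1
  · exact Or.inl h
  · right
    have hnn : 0 ≤ PySem.Chars.find l [c] := by
      rcases (PySem.Chars.neg_one_le_find (s := l) (sub := [c])).lt_or_eq with h1 | h1
      · omega
      · exact absurd h1.symm h
    obtain ⟨hpre, _⟩ := PySem.Chars.find_spec hnn
    set m := (PySem.Chars.find l [c]).toNat with hm
    have hget : l[m]? = some c := (pvPrefix_drop c l m).mp hpre
    have hmlt : m < l.length := by
      by_contra hh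
      simp [List.getElem?_eq_none (by omega : l.length ≤ m)] at hget
    have hcm : l[m] = c := by simpa [List.getElem?_eq_getElem hmlt] using hget
    have : ¬ m < j := by
      intro hlt
      have := hbef m hmlt hlt
      rw [hcm, hc] at this
      exact Bool.false_ne_true this.symm
    omega

-- the first terminator char itself is found exactly at j
theorem pvFind_eq (l : List Char) (j : Nat) (hj : j < l.length)
    (hc : pvTerm l[j] = true)
    (hbef : ∀ i (h : i < l.length), i < j → pvTerm l[i] = false) :
    PySem.Chars.find l [l[j]] = (j : Int) := by
  have hmem : l[j] ∈ l := List.getElem_mem hj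
  have hnn : 0 ≤ PySem.Chars.find l [l[j]] :=
    (PySem.Chars.find_nonneg_iff l [l[j]]).mpr ((pvSingleton_infix _ l).mpr hmem)
  obtain ⟨hpre, hmin⟩ := PySem.Chars.find_spec hnn
  set m := (PySem.Chars.find l [l[j]]).toNat with hm
  have hle : m ≤ j := by
    by_contra hh
    exact hmin j (by omega) ((pvPrefix_drop _ l j).mpr (by simp [List.getElem?_eq_getElem hj]))
  have hge : j ≤ m := by
    rcases pvFind_ge l l[j] j hc hbef with h | h
    · rw [h] at hnn; omega
    · omega
  omega

-- ===== VERDICT =====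
theorem get_sentance_raw_txt_spec : Claim_equal_get_sentance_raw_txt := by
  intro s _
  unfold Spec_get_sentance_raw_txt get_sentance_raw_txt get_sentance_raw_txt_alt
  dsimp only
  have hA := pvAgo_spec s s.toList 0
  rw [show ((0 : Nat) : Int) = 0 from rfl] at hA
  rw [hA]
  cases hfi : s.toList.findIdx? pvTerm with
  | none =>
    rw [List.findIdx?_eq_none_iff] at hfi
    have hfind : ∀ c : Char, pvTerm c = true → PySem.Chars.find s.toList [c] = -1 := by
      intro c hc
      rw [PySem.Chars.find_eq_neg_one_iff, pvSingleton_infix]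
      intro hmem
      have := hfi c hmem
      rw [hc] at this
      simp at this
    have hemp : (PySem.List.min? ([] : List Int) fun x => x) = none :=
      (PySem.List.min?_eq_none_iff _ _).mpr rfl
    simp [PySem.Str.find_eq, hfind '.' (by decide), hfind '?' (by decide), hfind '!' (by decide)]
    rw [hemp]
  | some j =>
    rw [List.findIdx?_eq_some_iff_getElem] at hfi
    obtain ⟨hj, hpj, hbef'⟩ := hfi
    have hbef : ∀ i (h : i < s.toList.length), i < j → pvTerm s.toList[i] = false := by
      intro i h hij
      have := hbef' i hij
      simpa using this
    have hge : ∀ c : Char, pvTerm c = true →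
        PySem.Chars.find s.toList [c] = -1 ∨ (j : Int) ≤ PySem.Chars.find s.toList [c] :=
      fun c hc => pvFind_ge s.toList c j hc hbef
    have hd : PySem.Chars.find s.toList [s.toList[j]] = (j : Int) := pvFind_eq s.toList j hj hpj hbef
    set hits := ([ '.', '?', '!'].map (fun c => PySem.Str.find s (String.ofList [c]))).filter
        (fun x => x ≠ -1) with hhits
    have hmemhits : (j : Int) ∈ hits := by
      have hd3 : s.toList[j] = '.' ∨ s.toList[j] = '?' ∨ s.toList[j] = '!' := by
        have := hpj; simp [pvTerm] at this; tauto
      rw [hhits]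
      simp only [List.map_cons, List.map_nil, PySem.Str.find_eq, List.mem_filter]
      rcases hd3 with h | h | h <;> rw [h] at hd <;>
        simp [hd, List.mem_cons]
    have hlb : ∀ x ∈ hits, (j : Int) ≤ x := by
      intro x hx
      rw [hhits] at hx
      simp only [List.map_cons, List.map_nil, PySem.Str.find_eq, List.mem_filter,
        List.mem_cons, List.not_mem_nil, or_false] at hx
      obtain ⟨hx1, hx2⟩ := hx
      rcases hx1 with h | h | h <;> subst h <;>
        [rcases hge '.' (by decide) with hh | hh;
         rcases hge '?' (by decide) with hh | hh;
         rcases hge '!' (by decide) with hh | hh] <;>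
        simp_all
    cases hmin : PySem.List.min? hits (fun x => x) with
    | none =>
      rw [PySem.List.min?_eq_none_iff] at hmin
      rw [hmin] at hmemhits
      exact absurd hmemhits (List.not_mem_nil)
    | some m =>
      have hm1 : m ∈ hits := PySem.List.min?_mem hmin
      have hm2 : m ≤ (j : Int) := PySem.List.min?_isMin hmin _ hmemhits
      have hm3 : (j : Int) ≤ m := hlb m hm1
      have hmj : m = (j : Int) := le_antisymm hm2 hm3
      subst hmj
      simp
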